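-- pv_equiv track=rewrite | github.com/Sarthakm811/Agents | src/agents/swarm.py | _parse_gaps
-- ===== SOURCE A (Python) =====
-- from typing import Any, Callable, Dict, List, Optional
--
-- def _parse_gaps(content: str) -> List[str]:
--     gaps = []
--     current_gap = []
--     for line in content.split("\n"):
--         stripped = line.strip()
--         if stripped and (stripped[0].isdigit() or stripped.startswith("Gap") or stripped.startswith("-")):
--             if current_gap:
--                 gaps.append(" ".join(current_gap))
--             current_gap = [stripped]
--         elif stripped and current_gap:
--             current_gap.append(stripped)
--     if current_gap:
--         gaps.append(" ".join(current_gap))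
--     return gaps if gaps else [content.strip()]
-- ===== SOURCE B (Python) =====
-- def _parse_gaps(content: str):
--     def is_header(s):
--         return s[0].isdigit() or s.startswith("Gap") or s.startswith("-")
--     lines = [s for line in content.split("\n") for s in (line.strip(),) if s]
--     i = 0
--     while i < len(lines) and not is_header(lines[i]):
--         i += 1
--     groups = []
--     while i < len(lines):
--         j = i + 1
--         while j < len(lines) and not is_header(lines[j]):
--             j += 1
--         groups.append(" ".join(lines[i:j]))
--         i = j
--     return groups if groups else [content.strip()]
-- ===== Notes on version B (the rewrite author's own statement) =====
-- stated objective: simpler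
-- what changed: Instead of one loop threading a (gaps, current_gap) accumulator over raw lines, B first strips and drops empty lines in one pass, then chunks the remaining lines at header lines (take-until-next-header / recurse on the rest) and joins each chunk.
import Mathlib
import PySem

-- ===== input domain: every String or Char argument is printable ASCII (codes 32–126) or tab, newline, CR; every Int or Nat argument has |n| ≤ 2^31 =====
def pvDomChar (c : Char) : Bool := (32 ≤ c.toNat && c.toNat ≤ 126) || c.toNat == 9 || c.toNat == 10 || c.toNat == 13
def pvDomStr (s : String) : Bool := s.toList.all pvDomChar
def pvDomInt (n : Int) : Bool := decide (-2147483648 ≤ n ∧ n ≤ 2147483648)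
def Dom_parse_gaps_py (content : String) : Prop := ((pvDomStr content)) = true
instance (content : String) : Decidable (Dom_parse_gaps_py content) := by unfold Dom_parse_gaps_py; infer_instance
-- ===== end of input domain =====

-- B (simpler decomposition): strip+filter the lines once, then chunk the nonempty lines at
-- header lines by take/drop, joining each chunk — no threaded (gaps, current_gap) accumulator.

-- shared header test (the identical condition both Pythons write: s[0].isdigit() or s.startswith("Gap") or s.startswith("-"))
def pvIsHeader (s : String) : Bool :=
  (match PySem.Str.pyGet? s 0 with
   | some c => PySem.Chars.isdigit c
   | none => false)
  || PySem.Str.startswith s "Gap" || PySem.Str.startswith s "-"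

-- ===== PORT A =====
def pvStepA (st : List String × List String) (line : String) : List String × List String :=
  let stripped := PySem.Str.strip line
  if stripped ≠ "" ∧ pvIsHeader stripped then
    ((if st.2 = [] then st.1 else st.1 ++ [PySem.Str.join " " st.2]), [stripped])
  else if stripped ≠ "" ∧ st.2 ≠ [] then
    (st.1, st.2 ++ [stripped])
  else st

def parse_gaps_py (content : String) : List String :=
  let st := List.foldl pvStepA ([], []) ((PySem.Str.split? content "\n").getD [])
  let gaps := if st.2 = [] then st.1 else st.1 ++ [PySem.Str.join " " st.2]
  if gaps ≠ [] then gaps else [PySem.Str.strip content]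

-- ===== PORT B =====
def pvChunks (ls : List String) : List String :=
  match ls with
  | [] => []
  | h :: rest =>
      PySem.Str.join " " (h :: rest.takeWhile (fun s => !pvIsHeader s))
        :: pvChunks (rest.dropWhile (fun s => !pvIsHeader s))
termination_by ls.length
decreasing_by
  simpa using Nat.lt_succ_of_le (List.length_dropWhile_le _ _)

def parse_gaps_py_alt (content : String) : List String :=
  let lines := (((PySem.Str.split? content "\n").getD []).map PySem.Str.strip).filter
    (fun s => s ≠ "")
  let groups := pvChunks (lines.dropWhile (fun s => !pvIsHeader s))
  if groups ≠ [] then groups else [PySem.Str.strip content]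

-- ===== PRECONDITION & SPEC =====
def Spec_parse_gaps_py (content : String) (out : List String) : Prop := out = parse_gaps_py_alt content
instance (content : String) (out : List String) : Decidable (Spec_parse_gaps_py content out) := by unfold Spec_parse_gaps_py; infer_instance

-- ===== CLAIM (what is proved, stated in full; the proofs are below) =====
def Claim_equal_parse_gaps_py : Prop := ∀ (content : String), Dom_parse_gaps_py content → Spec_parse_gaps_py content (parse_gaps_py content)

-- ===== LEMMAS AND PROOFS =====

-- A's step on an already-stripped line
def pvStepS (st : List String × List String) (s : String) : List String × List String :=
  if s ≠ "" ∧ pvIsHeader s then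
    ((if st.2 = [] then st.1 else st.1 ++ [PySem.Str.join " " st.2]), [s])
  else if s ≠ "" ∧ st.2 ≠ [] then
    (st.1, st.2 ++ [s])
  else st

def pvFinish (st : List String × List String) : List String :=
  if st.2 = [] then st.1 else st.1 ++ [PySem.Str.join " " st.2]

lemma pvStepS_empty (st : List String × List String) : pvStepS st "" = st := by
  simp [pvStepS]

lemma foldl_filter_stepS : ∀ (ms : List String) (st : List String × List String),
    List.foldl pvStepS st (ms.filter (fun s => s ≠ "")) = List.foldl pvStepS st ms := by
  intro ms
  induction ms with
  | nil => intro st; rfl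
  | cons s rest ih =>
      intro st
      by_cases h : s = ""
      · rw [List.filter_cons_of_neg (by simp [h]), List.foldl_cons, h, pvStepS_empty, ih]
      · rw [List.filter_cons_of_pos (by simp [h]), List.foldl_cons, List.foldl_cons, ih]

lemma pvMain : ∀ (ls : List String) (gaps cur : List String),
    (∀ s ∈ ls, s ≠ "") → cur ≠ [] →
    pvFinish (List.foldl pvStepS (gaps, cur) ls) =
      gaps ++ PySem.Str.join " " (cur ++ ls.takeWhile (fun s => !pvIsHeader s))
        :: pvChunks (ls.dropWhile (fun s => !pvIsHeader s)) := by
  intro ls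
  induction ls with
  | nil =>
      intro gaps cur _ hc
      simp [pvFinish, hc, pvChunks]
  | cons s rest ih =>
      intro gaps cur hne hc
      have hs : s ≠ "" := hne s (by simp)
      have hne' : ∀ t ∈ rest, t ≠ "" := fun t ht => hne t (by simp [ht])
      by_cases hh : pvIsHeader s = true
      · rw [List.foldl_cons]
        have hstep : pvStepS (gaps, cur) s =
            (gaps ++ [PySem.Str.join " " cur], [s]) := by
          simp [pvStepS, hs, hh, hc]
        rw [hstep, ih _ [s] hne' (by simp)]
        rw [List.takeWhile_cons, List.dropWhile_cons]
        simp [hh, pvChunks]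
      · rw [List.foldl_cons]
        have hstep : pvStepS (gaps, cur) s = (gaps, cur ++ [s]) := by
          simp [pvStepS, hs, hh, hc]
        rw [hstep, ih _ _ hne' (by simp [hc])]
        rw [List.takeWhile_cons, List.dropWhile_cons]
        simp [hh]

lemma pvTop : ∀ (ls : List String), (∀ s ∈ ls, s ≠ "") →
    pvFinish (List.foldl pvStepS ([], []) ls) =
      pvChunks (ls.dropWhile (fun s => !pvIsHeader s)) := by
  intro ls
  induction ls with
  | nil => intro _; simp [pvFinish, pvChunks]
  | cons s rest ih =>
      intro hne
      have hs : s ≠ "" := hne s (by simp)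
      have hne' : ∀ t ∈ rest, t ≠ "" := fun t ht => hne t (by simp [ht])
      by_cases hh : pvIsHeader s = true
      · rw [List.foldl_cons]
        have hstep : pvStepS ([], []) s = ([], [s]) := by
          simp [pvStepS, hs, hh]
        rw [hstep, pvMain rest [] [s] hne' (by simp)]
        rw [List.dropWhile_cons]
        simp [hh, pvChunks]
      · rw [List.foldl_cons]
        have hstep : pvStepS ([], []) s = ([], []) := by
          simp [pvStepS, hs, hh]
        rw [hstep, ih hne']
        rw [List.dropWhile_cons]
        simp [hh]

-- ===== VERDICT (by name: the statement is the Claim_ definition above) =====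
theorem parse_gaps_py_spec : Claim_equal_parse_gaps_py := by
  intro content _
  unfold Spec_parse_gaps_py parse_gaps_py parse_gaps_py_alt
  have h1 : List.foldl pvStepA ([], []) ((PySem.Str.split? content "\n").getD []) =
      List.foldl pvStepS ([], [])
        (((((PySem.Str.split? content "\n").getD []).map PySem.Str.strip)).filter
          (fun s => s ≠ "")) := by
    rw [foldl_filter_stepS, List.foldl_map]
    rfl
  have hne : ∀ s ∈ (((((PySem.Str.split? content "\n").getD []).map PySem.Str.strip)).filter
      (fun s => s ≠ "")), s ≠ "" := by
    intro s hs
    simpa using (List.mem_filter.mp hs).2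
  have h2 := pvTop _ hne
  simp only [pvFinish] at h2
  simp only [h1, h2]
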